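-- pv_equiv track=rewrite | github.com/PennyChain/Dark_cli_game | app/effects/ted.py | interpret_choice
-- ===== SOURCE A (Python) =====
-- def interpret_choice(user_input, yes_choices, no_choices, third_choices, four_choices, quit_choices):
--     user_input = user_input.lower().split()
--
--     # Sjekk hele inputen mot forhåndsdefinerte valg
--     if any(word in yes_choices for word in user_input):
--         return "yes"
--     elif any(word in no_choices for word in user_input):
--         return "no"
--     elif any(word in third_choices for word in user_input):
--         return "third"
--     elif any(word in four_choices for word in user_input):
--         return "four"
--     elif any(word in quit_choices for word in user_input):
--         return "quit"
--
--     return "unknown"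
-- ===== SOURCE B (Python) =====
-- def interpret_choice(user_input, yes_choices, no_choices, third_choices, four_choices, quit_choices):
--     labels = ("yes", "no", "third", "four", "quit")
--     collections = (yes_choices, no_choices, third_choices, four_choices, quit_choices)
--     best = 5
--     for word in user_input.lower().split():
--         for rank in range(best):
--             if word in collections[rank]:
--                 best = rank
--                 break
--     return labels[best] if best < 5 else "unknown"
-- ===== Notes on version B (the rewrite author's own statement) =====
-- stated objective: alternative
-- what changed: Replaces A's five sequential any()-scans over the word list by a single word-outer pass that tracks the best (lowest) matching category rank, scanning only categories below the current best, and maps the final rank back to its label.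
import Mathlib
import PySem

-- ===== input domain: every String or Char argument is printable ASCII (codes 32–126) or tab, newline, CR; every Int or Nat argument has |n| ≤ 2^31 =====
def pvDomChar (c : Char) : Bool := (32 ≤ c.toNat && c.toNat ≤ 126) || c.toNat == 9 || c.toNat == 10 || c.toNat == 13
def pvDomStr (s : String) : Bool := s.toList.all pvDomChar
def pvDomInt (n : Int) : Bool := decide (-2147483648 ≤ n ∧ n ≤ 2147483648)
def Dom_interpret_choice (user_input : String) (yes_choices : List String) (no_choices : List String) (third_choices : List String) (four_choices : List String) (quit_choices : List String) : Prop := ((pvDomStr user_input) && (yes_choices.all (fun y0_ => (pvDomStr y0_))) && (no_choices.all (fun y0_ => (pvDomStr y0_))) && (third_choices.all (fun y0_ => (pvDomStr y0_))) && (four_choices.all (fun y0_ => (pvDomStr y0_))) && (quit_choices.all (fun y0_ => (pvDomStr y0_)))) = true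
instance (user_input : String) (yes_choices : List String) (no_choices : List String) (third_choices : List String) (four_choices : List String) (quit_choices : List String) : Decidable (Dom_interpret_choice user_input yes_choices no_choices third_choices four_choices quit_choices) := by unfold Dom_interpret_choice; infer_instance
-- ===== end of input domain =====

-- B replaces A's five sequential any()-scans by one word-outer pass tracking the best
-- matching category rank (objective: alternative decomposition, same cost).

-- ===== PORT A =====
def interpret_choice (user_input : String) (yes_choices : List String) (no_choices : List String) (third_choices : List String) (four_choices : List String) (quit_choices : List String) : String :=
  let ws := PySem.Str.split₀ (PySem.Str.lower user_input)
  if ws.any (fun w => yes_choices.contains w) then "yes"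
  else if ws.any (fun w => no_choices.contains w) then "no"
  else if ws.any (fun w => third_choices.contains w) then "third"
  else if ws.any (fun w => four_choices.contains w) then "four"
  else if ws.any (fun w => quit_choices.contains w) then "quit"
  else "unknown"

-- ===== PORT B =====
-- inner 'for rank in range(best): if word in collections[rank]: best = rank; break'
def pvInnerLoop (cols : List (List String)) (w : String) : List Nat → Nat → Nat
  | [], best => best
  | r :: rs, best => if (cols.getD r []).contains w then r else pvInnerLoop cols w rs best

def interpret_choice_alt (user_input : String) (yes_choices : List String) (no_choices : List String) (third_choices : List String) (four_choices : List String) (quit_choices : List String) : String :=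
  let labels : List String := ["yes", "no", "third", "four", "quit"]
  let cols : List (List String) := [yes_choices, no_choices, third_choices, four_choices, quit_choices]
  let best := (PySem.Str.split₀ (PySem.Str.lower user_input)).foldl
      (fun b w => pvInnerLoop cols w (List.range b) b) 5
  if best < 5 then labels.getD best "unknown" else "unknown"

-- ===== PRECONDITION & SPEC =====
def Spec_interpret_choice (user_input : String) (yes_choices : List String) (no_choices : List String) (third_choices : List String) (four_choices : List String) (quit_choices : List String) (out : String) : Prop := out = interpret_choice_alt user_input yes_choices no_choices third_choices four_choices quit_choices
instance (user_input : String) (yes_choices : List String) (no_choices : List String) (third_choices : List String) (four_choices : List String) (quit_choices : List String) (out : String) : Decidable (Spec_interpret_choice user_input yes_choices no_choices third_choices four_choices quit_choices out) := by unfold Spec_interpret_choice; infer_instance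

-- ===== CLAIM (what is proved, stated in full; the proofs are below) =====
def Claim_equal_interpret_choice : Prop := ∀ (user_input : String) (yes_choices : List String) (no_choices : List String) (third_choices : List String) (four_choices : List String) (quit_choices : List String), Dom_interpret_choice user_input yes_choices no_choices third_choices four_choices quit_choices → Spec_interpret_choice user_input yes_choices no_choices third_choices four_choices quit_choices (interpret_choice user_input yes_choices no_choices third_choices four_choices quit_choices)

-- ===== LEMMAS AND PROOFS =====

-- priority rank of a single word
def pvRank (ys ns ts fs qs : List String) (w : String) : Nat :=
  if ys.contains w then 0 else if ns.contains w then 1 else if ts.contains w then 2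
  else if fs.contains w then 3 else if qs.contains w then 4 else 5

theorem pvInnerLoop_eq (ys ns ts fs qs : List String) (w : String) (b : Nat) (hb : b ≤ 5) :
    pvInnerLoop [ys, ns, ts, fs, qs] w (List.range b) b = min b (pvRank ys ns ts fs qs w) := by
  interval_cases b <;>
    simp only [show List.range 0 = [] from rfl, show List.range 1 = [0] from rfl,
      show List.range 2 = [0,1] from rfl, show List.range 3 = [0,1,2] from rfl,
      show List.range 4 = [0,1,2,3] from rfl, show List.range 5 = [0,1,2,3,4] from rfl,
      pvInnerLoop, pvRank, List.getD] <;>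
    split_ifs <;> simp_all

theorem pvFold_eq (ys ns ts fs qs : List String) (ws : List String) (b : Nat) (hb : b ≤ 5) :
    ws.foldl (fun b w => pvInnerLoop [ys, ns, ts, fs, qs] w (List.range b) b) b
      = ws.foldl (fun b w => min b (pvRank ys ns ts fs qs w)) b := by
  induction ws generalizing b with
  | nil => rfl
  | cons w ws ih =>
      simp only [List.foldl_cons, pvInnerLoop_eq ys ns ts fs qs w b hb]
      exact ih _ (le_trans (Nat.min_le_left _ _) hb)

theorem pvMin_le_iff (ys ns ts fs qs : List String) (ws : List String) (b k : Nat) :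
    ws.foldl (fun b w => min b (pvRank ys ns ts fs qs w)) b ≤ k
      ↔ b ≤ k ∨ ∃ w ∈ ws, pvRank ys ns ts fs qs w ≤ k := by
  induction ws generalizing b with
  | nil => simp
  | cons w ws ih =>
      simp only [List.foldl_cons, ih, min_le_iff, List.mem_cons]
      constructor
      · rintro (( h | h ) | ⟨x, hx, h⟩)
        · exact Or.inl h
        · exact Or.inr ⟨w, Or.inl rfl, h⟩
        · exact Or.inr ⟨x, Or.inr hx, h⟩
      · rintro (h | ⟨x, (rfl | hx), h⟩)
        · exact Or.inl (Or.inl h)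
        · exact Or.inl (Or.inr h)
        · exact Or.inr ⟨x, hx, h⟩

theorem pvRank_le0 (ys ns ts fs qs : List String) (w : String) :
    pvRank ys ns ts fs qs w ≤ 0 ↔ w ∈ ys := by
  simp only [pvRank]; split_ifs <;> simp_all
theorem pvRank_le1 (ys ns ts fs qs : List String) (w : String) :
    pvRank ys ns ts fs qs w ≤ 1 ↔ w ∈ ys ∨ w ∈ ns := by
  simp only [pvRank]; split_ifs <;> simp_all
theorem pvRank_le2 (ys ns ts fs qs : List String) (w : String) :
    pvRank ys ns ts fs qs w ≤ 2 ↔ w ∈ ys ∨ w ∈ ns ∨ w ∈ ts := by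
  simp only [pvRank]; split_ifs <;> simp_all
theorem pvRank_le3 (ys ns ts fs qs : List String) (w : String) :
    pvRank ys ns ts fs qs w ≤ 3 ↔ w ∈ ys ∨ w ∈ ns ∨ w ∈ ts ∨ w ∈ fs := by
  simp only [pvRank]; split_ifs <;> simp_all
theorem pvRank_le4 (ys ns ts fs qs : List String) (w : String) :
    pvRank ys ns ts fs qs w ≤ 4 ↔ w ∈ ys ∨ w ∈ ns ∨ w ∈ ts ∨ w ∈ fs ∨ w ∈ qs := by
  simp only [pvRank]; split_ifs <;> simp_all

theorem pvKey (ys ns ts fs qs : List String) (ws : List String) :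
    (if ws.any (fun w => ys.contains w) then "yes"
     else if ws.any (fun w => ns.contains w) then "no"
     else if ws.any (fun w => ts.contains w) then "third"
     else if ws.any (fun w => fs.contains w) then "four"
     else if ws.any (fun w => qs.contains w) then "quit"
     else "unknown")
      = (if (ws.foldl (fun b w => pvInnerLoop [ys, ns, ts, fs, qs] w (List.range b) b) 5) < 5
         then (["yes", "no", "third", "four", "quit"] : List String).getD
           (ws.foldl (fun b w => pvInnerLoop [ys, ns, ts, fs, qs] w (List.range b) b) 5) "unknown"
         else "unknown") := by
  rw [pvFold_eq ys ns ts fs qs ws 5 (le_refl 5)]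
  set m := ws.foldl (fun b w => min b (pvRank ys ns ts fs qs w)) 5 with hm
  have h5 : m ≤ 5 := by rw [hm, pvMin_le_iff]; exact Or.inl (le_refl 5)
  have c0 : m ≤ 0 ↔ ∃ w ∈ ws, w ∈ ys := by
    rw [hm, pvMin_le_iff]; simp only [pvRank_le0]; simp
  have c1 : m ≤ 1 ↔ ∃ w ∈ ws, w ∈ ys ∨ w ∈ ns := by
    rw [hm, pvMin_le_iff]; simp only [pvRank_le1]; simp
  have c2 : m ≤ 2 ↔ ∃ w ∈ ws, w ∈ ys ∨ w ∈ ns ∨ w ∈ ts := by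
    rw [hm, pvMin_le_iff]; simp only [pvRank_le2]; simp
  have c3 : m ≤ 3 ↔ ∃ w ∈ ws, w ∈ ys ∨ w ∈ ns ∨ w ∈ ts ∨ w ∈ fs := by
    rw [hm, pvMin_le_iff]; simp only [pvRank_le3]; simp
  have c4 : m ≤ 4 ↔ ∃ w ∈ ws, w ∈ ys ∨ w ∈ ns ∨ w ∈ ts ∨ w ∈ fs ∨ w ∈ qs := by
    rw [hm, pvMin_le_iff]; simp only [pvRank_le4]; simp
  by_cases hy : ∃ w ∈ ws, w ∈ ys
  · have hm0 : m = 0 := by have := c0.mpr hy; omega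
    simp [List.any_eq_true, hy, hm0]
  · have ny : ¬ m ≤ 0 := fun h => hy (c0.mp h)
    by_cases hn : ∃ w ∈ ws, w ∈ ns
    · have hm1 : m = 1 := by
        have : m ≤ 1 := c1.mpr (by obtain ⟨w, hw, hc⟩ := hn; exact ⟨w, hw, Or.inr hc⟩)
        omega
      simp [List.any_eq_true, hy, hn, hm1]
    · have nn : ¬ m ≤ 1 := by
        intro h
        obtain ⟨w, hw, hc | hc⟩ := c1.mp h
        · exact hy ⟨w, hw, hc⟩
        · exact hn ⟨w, hw, hc⟩
      by_cases ht : ∃ w ∈ ws, w ∈ ts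
      · have hm2 : m = 2 := by
          have : m ≤ 2 := c2.mpr (by obtain ⟨w, hw, hc⟩ := ht; exact ⟨w, hw, Or.inr (Or.inr hc)⟩)
          omega
        simp [List.any_eq_true, hy, hn, ht, hm2]
      · have nt : ¬ m ≤ 2 := by
          intro h
          obtain ⟨w, hw, hc | hc | hc⟩ := c2.mp h
          · exact hy ⟨w, hw, hc⟩
          · exact hn ⟨w, hw, hc⟩
          · exact ht ⟨w, hw, hc⟩
        by_cases hf : ∃ w ∈ ws, w ∈ fs
        · have hm3 : m = 3 := by
            have : m ≤ 3 := c3.mpr (by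
              obtain ⟨w, hw, hc⟩ := hf; exact ⟨w, hw, Or.inr (Or.inr (Or.inr hc))⟩)
            omega
          simp [List.any_eq_true, hy, hn, ht, hf, hm3]
        · have nf : ¬ m ≤ 3 := by
            intro h
            obtain ⟨w, hw, hc | hc | hc | hc⟩ := c3.mp h
            · exact hy ⟨w, hw, hc⟩
            · exact hn ⟨w, hw, hc⟩
            · exact ht ⟨w, hw, hc⟩
            · exact hf ⟨w, hw, hc⟩
          by_cases hq : ∃ w ∈ ws, w ∈ qs
          · have hm4 : m = 4 := by
              have : m ≤ 4 := c4.mpr (by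
                obtain ⟨w, hw, hc⟩ := hq; exact ⟨w, hw, Or.inr (Or.inr (Or.inr (Or.inr hc)))⟩)
              omega
            simp [List.any_eq_true, hy, hn, ht, hf, hq, hm4]
          · have nq : ¬ m ≤ 4 := by
              intro h
              obtain ⟨w, hw, hc | hc | hc | hc | hc⟩ := c4.mp h
              · exact hy ⟨w, hw, hc⟩
              · exact hn ⟨w, hw, hc⟩
              · exact ht ⟨w, hw, hc⟩
              · exact hf ⟨w, hw, hc⟩
              · exact hq ⟨w, hw, hc⟩
            have hm5 : m = 5 := by omega
            simp [List.any_eq_true, hy, hn, ht, hf, hq, hm5]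

-- ===== VERDICT (by name: the statement is the Claim_ definition above) =====
theorem interpret_choice_spec : Claim_equal_interpret_choice := by
  intro u ys ns ts fs qs _
  unfold Spec_interpret_choice interpret_choice interpret_choice_alt
  exact pvKey ys ns ts fs qs (PySem.Str.split₀ (PySem.Str.lower u))
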